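-- pv_equiv track=rewrite | github.com/AdityaHegde712/RecSysProject | scripts/explore_data.py | _length_bucket_key
-- ===== SOURCE A (Python) =====
-- LENGTH_BUCKETS = [(1, 10), (11, 50), (51, 100), (101, 200), (201, 500), (501, None)]
--
-- def _length_bucket_key(word_count: int) -> str:
--     """Return the bucket label for a given word count."""
--     for lo, hi in LENGTH_BUCKETS:
--         if hi is None:
--             if word_count >= lo:
--                 return f"{lo}+"
--         elif lo <= word_count <= hi:
--             return f"{lo}-{hi}"
--     return "0"
-- ===== SOURCE B (Python) =====
-- import bisect
--
-- _BOUNDS = [1, 11, 51, 101, 201, 501]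
-- _LABELS = ["0", "1-10", "11-50", "51-100", "101-200", "201-500", "501+"]
--
-- def _length_bucket_key(word_count: int) -> str:
--     """Return the bucket label for a given word count."""
--     return _LABELS[bisect.bisect_right(_BOUNDS, word_count)]
-- ===== Notes on version B (the rewrite author's own statement) =====
-- stated objective: idiomatic
-- what changed: Replaces the linear scan over (lo,hi) range pairs building f-string labels with a bisect_right binary search over a precomputed lower-bound list indexing a precomputed label table.
import Mathlib
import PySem

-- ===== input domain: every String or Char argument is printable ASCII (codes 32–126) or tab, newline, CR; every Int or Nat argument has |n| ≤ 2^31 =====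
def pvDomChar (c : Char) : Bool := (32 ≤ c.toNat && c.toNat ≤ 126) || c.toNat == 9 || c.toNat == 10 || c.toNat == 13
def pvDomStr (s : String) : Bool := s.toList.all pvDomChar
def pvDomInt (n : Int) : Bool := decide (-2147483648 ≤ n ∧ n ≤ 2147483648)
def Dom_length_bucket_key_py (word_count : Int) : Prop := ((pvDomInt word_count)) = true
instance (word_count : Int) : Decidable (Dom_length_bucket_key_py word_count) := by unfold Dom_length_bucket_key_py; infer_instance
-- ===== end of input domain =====

-- B replaces A's linear scan over (lo,hi) range pairs (building f-string labels) with a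
-- bisect_right binary search over a precomputed lower-bound list indexing a label table (idiomatic).

-- ===== PORT A =====
def pvLengthBuckets : List (Int × Option Int) :=
  [(1, some 10), (11, some 50), (51, some 100), (101, some 200), (201, some 500), (501, none)]

-- the for-loop with early return, as structural recursion over the bucket list
def pvBucketLoop (word_count : Int) : List (Int × Option Int) → String
  | [] => "0"
  | (lo, hi) :: rest =>
    match hi with
    | none => if word_count ≥ lo then PySem.Int.toStr lo ++ "+" else pvBucketLoop word_count rest
    | some h =>
      if lo ≤ word_count ∧ word_count ≤ h then
        PySem.Int.toStr lo ++ "-" ++ PySem.Int.toStr h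
      else pvBucketLoop word_count rest

def length_bucket_key_py (word_count : Int) : String :=
  pvBucketLoop word_count pvLengthBuckets

-- ===== PORT B =====
def pvBounds : List Int := [1, 11, 51, 101, 201, 501]
def pvLabels : List String := ["0", "1-10", "11-50", "51-100", "101-200", "201-500", "501+"]

-- bisect.bisect_right's lo<hi loop, fuel = list length (the loop halves [lo,hi) each step)
def pvBisectGo (x : Int) (a : List Int) : Nat → Nat → Nat → Nat
  | 0, lo, _ => lo
  | fuel + 1, lo, hi =>
    if lo < hi then
      let mid := (lo + hi) / 2
      if x < a.getD mid 0 then pvBisectGo x a fuel lo mid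
      else pvBisectGo x a fuel (mid + 1) hi
    else lo

def pvBisectRight (a : List Int) (x : Int) : Nat :=
  pvBisectGo x a a.length 0 a.length

def length_bucket_key_py_alt (word_count : Int) : String :=
  pvLabels.getD (pvBisectRight pvBounds word_count) ""

-- ===== PRECONDITION & SPEC =====
def Spec_length_bucket_key_py (word_count : Int) (out : String) : Prop := out = length_bucket_key_py_alt word_count
instance (word_count : Int) (out : String) : Decidable (Spec_length_bucket_key_py word_count out) := by unfold Spec_length_bucket_key_py; infer_instance

-- ===== CLAIM (what is proved, stated in full; the proofs are below) =====
def Claim_equal_length_bucket_key_py : Prop := ∀ (word_count : Int), Dom_length_bucket_key_py word_count → Spec_length_bucket_key_py word_count (length_bucket_key_py word_count)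

-- ===== LEMMAS AND PROOFS =====

-- ===== VERDICT (by name: the statement is the Claim_ definition above) =====
theorem length_bucket_key_py_spec : Claim_equal_length_bucket_key_py := by
  intro wc _
  unfold Spec_length_bucket_key_py length_bucket_key_py length_bucket_key_py_alt
  simp only [pvLengthBuckets, pvBucketLoop, pvBisectRight, pvBounds, pvLabels, pvBisectGo,
    List.length, List.getD, ge_iff_le]
  norm_num
  split_ifs <;> first | rfl | omega
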